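-- pv_equiv track=rewrite | github.com/peppone-choi/hoi4-modding-agent | hoi4_agent/core/hoi4_generator.py | parse_pdx_to_tokens
-- ===== SOURCE A (Python) =====
-- def parse_pdx_to_tokens(text: str) -> list[str]:
--     """PDX 스크립트를 토큰 리스트로 분리한다 (검증용).
--
--     토큰: 식별자, 문자열리터럴, ``=``, ``{``, ``}``.
--     주석(``#``)은 제거한다.
--     """
--     tokens: list[str] = []
--     i = 0
--     n = len(text)
--     while i < n:
--         c = text[i]
--         # 공백/줄바꿈 건너뛰기
--         if c in " \t\r\n":
--             i += 1
--             continue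
--         # 주석
--         if c == "#":
--             while i < n and text[i] != "\n":
--                 i += 1
--             continue
--         # 구조 문자
--         if c in "={}":
--             tokens.append(c)
--             i += 1
--             continue
--         # 따옴표 문자열
--         if c == '"':
--             j = i + 1
--             while j < n and text[j] != '"':
--                 if text[j] == "\\":
--                     j += 1  # 이스케이프
--                 j += 1
--             tokens.append(text[i : j + 1])
--             i = j + 1
--             continue
--         # 식별자 / 숫자
--         j = i
--         while j < n and text[j] not in " \t\r\n={}#\"":
--             j += 1
--         tokens.append(text[i:j])
--         i = j
--     return tokens
-- ===== SOURCE B (Python) =====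
-- def _normal(c, buf, tokens):
--     # dispatch a character while outside any token; returns (new_state, new_buf)
--     if c == '"':
--         return 2, [c]
--     if c in "={}":
--         tokens.append(c)
--         return 0, buf
--     if c == '#':
--         return 4, buf
--     if c in " \t\r\n":
--         return 0, buf
--     return 1, [c]
--
-- def parse_pdx_to_tokens(text: str) -> list[str]:
--     # single-pass DFA: 0 normal, 1 identifier, 2 string, 3 string-escape, 4 comment
--     tokens: list[str] = []
--     state = 0
--     buf: list[str] = []
--     for c in text:
--         if state == 2:
--             buf.append(c)
--             if c == '"':
--                 tokens.append(''.join(buf))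
--                 state, buf = 0, []
--             elif c == '\\':
--                 state = 3
--         elif state == 3:
--             buf.append(c)
--             state = 2
--         elif state == 4:
--             if c == '\n':
--                 state = 0
--         elif state == 1:
--             if c in " \t\r\n={}#\"":
--                 tokens.append(''.join(buf))
--                 state, buf = _normal(c, [], tokens)
--             else:
--                 buf.append(c)
--         else:
--             state, buf = _normal(c, buf, tokens)
--     if state in (1, 2, 3):
--         tokens.append(''.join(buf))
--     return tokens
-- ===== Notes on version B (the rewrite author's own statement) =====
-- stated objective: alternative
-- what changed: Replaces A's index-based while-loop scanner with inner sub-loops (string scan, comment skip, identifier scan) by a single for-loop over the characters driving an explicit five-state DFA (normal/identifier/string/string-escape/comment) with a token buffer flushed on state exits and at end of input.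
import Mathlib
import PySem

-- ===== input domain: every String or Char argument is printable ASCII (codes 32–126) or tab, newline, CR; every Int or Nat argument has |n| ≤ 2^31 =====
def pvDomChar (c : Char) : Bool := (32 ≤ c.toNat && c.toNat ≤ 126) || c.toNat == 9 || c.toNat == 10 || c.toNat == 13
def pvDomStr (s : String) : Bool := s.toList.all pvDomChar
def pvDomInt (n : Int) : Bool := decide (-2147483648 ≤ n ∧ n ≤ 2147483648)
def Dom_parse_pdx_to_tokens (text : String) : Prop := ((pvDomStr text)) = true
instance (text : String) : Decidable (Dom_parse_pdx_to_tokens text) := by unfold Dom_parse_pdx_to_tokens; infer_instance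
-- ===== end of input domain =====

-- B replaces A's index-based while-loop scanner (with inner sub-scans) by a single-pass
-- five-state DFA folded over the characters (alternative decomposition, same cost).

def pvIsWs (c : Char) : Bool := c = ' ' || c = '\t' || c = '\r' || c = '\n'
def pvIsStruct (c : Char) : Bool := c = '=' || c = '{' || c = '}'
def pvIsIdent (c : Char) : Bool := !(pvIsWs c || pvIsStruct c || c = '#' || c = '"')

-- ===== PORT A =====
-- A's inner string loop: after the opening quote, consume until an unescaped
-- closing quote (included) or end of text; '\' skips the next char.
def pvScanStrA : List Char → (List Char × List Char)
  | [] => ([], [])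
  | c :: rest =>
    if c = '"' then ([c], rest)
    else if c = '\\' then
      match rest with
      | [] => ([c], [])
      | d :: rest' => let p := pvScanStrA rest'; (c :: d :: p.1, p.2)
    else
      let p := pvScanStrA rest; (c :: p.1, p.2)

theorem pvScanStrA_quote (rest : List Char) : pvScanStrA ('"' :: rest) = (['"'], rest) := by
  conv_lhs => rw [pvScanStrA.eq_def]
  simp

theorem pvScanStrA_lone : pvScanStrA ['\\'] = (['\\'], []) := by decide

theorem pvScanStrA_esc (d : Char) (rest : List Char) :
    pvScanStrA ('\\' :: d :: rest) = ('\\' :: d :: (pvScanStrA rest).1, (pvScanStrA rest).2) := by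
  conv_lhs => rw [pvScanStrA.eq_def]
  simp

theorem pvScanStrA_other (c : Char) (rest : List Char) (h1 : c ≠ '"') (h2 : c ≠ '\\') :
    pvScanStrA (c :: rest) = (c :: (pvScanStrA rest).1, (pvScanStrA rest).2) := by
  conv_lhs => rw [pvScanStrA.eq_def]
  simp [h1, h2]

theorem pvScanStrA_len : ∀ cs : List Char, (pvScanStrA cs).2.length ≤ cs.length := by
  intro cs
  induction cs using pvScanStrA.induct with
  | case1 => simp [pvScanStrA]
  | case2 rest' => simp [pvScanStrA_quote]
  | case3 => simp [pvScanStrA_lone]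
  | case4 d rest' h ih => simp [pvScanStrA_esc]; omega
  | case5 d rest' h1 h2 ih => simp [pvScanStrA_other d rest' h1 h2]; omega

-- A's comment loop: advance while the char is not '\n' (the '\n' itself stays).
def pvDropCommentA : List Char → List Char
  | [] => []
  | c :: rest => if c = '\n' then c :: rest else pvDropCommentA rest

theorem pvDropCommentA_len : ∀ cs : List Char, (pvDropCommentA cs).length ≤ cs.length := by
  intro cs
  induction cs with
  | nil => simp [pvDropCommentA]
  | cons c rest ih => simp only [pvDropCommentA]; split <;> simp <;> omega

-- A's identifier loop: advance while the char is not in " \t\r\n={}#\"".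
def pvScanIdentA : List Char → (List Char × List Char)
  | [] => ([], [])
  | c :: rest =>
    if pvIsIdent c then let p := pvScanIdentA rest; (c :: p.1, p.2)
    else ([], c :: rest)

theorem pvScanIdentA_len : ∀ cs : List Char, (pvScanIdentA cs).2.length ≤ cs.length := by
  intro cs
  induction cs with
  | nil => simp [pvScanIdentA]
  | cons c rest ih => simp only [pvScanIdentA]; split <;> simp <;> omega

-- A's main while loop, one branch per branch of A, in A's order
def pvTokA : List Char → List String
  | [] => []
  | c :: cs =>
    if pvIsWs c then pvTokA cs
    else if c = '#' then
      pvTokA (pvDropCommentA cs)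
    else if pvIsStruct c then String.mk [c] :: pvTokA cs
    else if c = '"' then
      let p := pvScanStrA cs
      String.mk ('"' :: p.1) :: pvTokA p.2
    else
      let p := pvScanIdentA cs
      String.mk (c :: p.1) :: pvTokA p.2
  termination_by cs => cs.length
  decreasing_by
    · simp only [List.length_cons]; omega
    · have := pvDropCommentA_len cs; simp only [List.length_cons]; omega
    · simp only [List.length_cons]; omega
    · have := pvScanStrA_len cs; simp only [List.length_cons]; omega
    · have := pvScanIdentA_len cs; simp only [List.length_cons]; omega

def parse_pdx_to_tokens (text : String) : List String := pvTokA text.toList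

-- ===== PORT B =====
-- B's fold state: DFA mode (0 normal, 1 identifier, 2 string, 3 string-escape,
-- 4 comment), current token buffer, tokens emitted so far.
structure PvStB where
  mode : Nat
  buf : List Char
  toks : List String
deriving Repr, DecidableEq

-- _normal: dispatch a character while outside any token
def pvNormalB (st : PvStB) (c : Char) : PvStB :=
  if c = '"' then { st with mode := 2, buf := [c] }
  else if pvIsStruct c then { st with toks := st.toks ++ [String.mk [c]] }
  else if c = '#' then { st with mode := 4 }
  else if pvIsWs c then st
  else { st with mode := 1, buf := [c] }

-- one DFA transition (the body of B's for-loop)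
def pvStepB (st : PvStB) (c : Char) : PvStB :=
  if st.mode = 2 then
    if c = '"' then { mode := 0, buf := [], toks := st.toks ++ [String.mk (st.buf ++ [c])] }
    else if c = '\\' then { st with mode := 3, buf := st.buf ++ [c] }
    else { st with buf := st.buf ++ [c] }
  else if st.mode = 3 then { st with mode := 2, buf := st.buf ++ [c] }
  else if st.mode = 4 then (if c = '\n' then { st with mode := 0 } else st)
  else if st.mode = 1 then
    if !pvIsIdent c then
      pvNormalB { mode := 0, buf := [], toks := st.toks ++ [String.mk st.buf] } c
    else { st with buf := st.buf ++ [c] }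
  else pvNormalB st c

-- flush after the loop: a pending identifier or (unterminated) string is emitted
def pvFinishB (st : PvStB) : List String :=
  if st.mode = 1 ∨ st.mode = 2 ∨ st.mode = 3 then st.toks ++ [String.mk st.buf] else st.toks

def parse_pdx_to_tokens_alt (text : String) : List String :=
  pvFinishB (text.toList.foldl pvStepB ⟨0, [], []⟩)

-- ===== PRECONDITION & SPEC =====
def Spec_parse_pdx_to_tokens (text : String) (out : List String) : Prop := out = parse_pdx_to_tokens_alt text
instance (text : String) (out : List String) : Decidable (Spec_parse_pdx_to_tokens text out) := by unfold Spec_parse_pdx_to_tokens; infer_instance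

-- ===== CLAIM (what is proved, stated in full; the proofs are below) =====
def Claim_equal_parse_pdx_to_tokens : Prop := ∀ (text : String), Dom_parse_pdx_to_tokens text → Spec_parse_pdx_to_tokens text (parse_pdx_to_tokens text)

-- ===== LEMMAS AND PROOFS =====
-- pointwise transition lemmas for pvStepB, one per DFA edge
theorem pvStepB_str_quote (buf : List Char) (ts : List String) :
    pvStepB ⟨2, buf, ts⟩ '"' = ⟨0, [], ts ++ [String.mk (buf ++ ['"'])]⟩ := by
  simp [pvStepB]

theorem pvStepB_str_esc (buf : List Char) (ts : List String) :
    pvStepB ⟨2, buf, ts⟩ '\\' = ⟨3, buf ++ ['\\'], ts⟩ := by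
  simp [pvStepB]

theorem pvStepB_str_other (c : Char) (buf : List Char) (ts : List String)
    (h1 : c ≠ '"') (h2 : c ≠ '\\') : pvStepB ⟨2, buf, ts⟩ c = ⟨2, buf ++ [c], ts⟩ := by
  simp [pvStepB, h1, h2]

theorem pvStepB_escState (c : Char) (buf : List Char) (ts : List String) :
    pvStepB ⟨3, buf, ts⟩ c = ⟨2, buf ++ [c], ts⟩ := by
  simp [pvStepB]

theorem pvStepB_comment_nl (buf : List Char) (ts : List String) :
    pvStepB ⟨4, buf, ts⟩ '\n' = ⟨0, buf, ts⟩ := by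
  simp [pvStepB]

theorem pvStepB_comment_other (c : Char) (buf : List Char) (ts : List String) (h : c ≠ '\n') :
    pvStepB ⟨4, buf, ts⟩ c = ⟨4, buf, ts⟩ := by
  simp [pvStepB, h]

theorem pvStepB_ident_cont (c : Char) (buf : List Char) (ts : List String)
    (h : pvIsIdent c = true) : pvStepB ⟨1, buf, ts⟩ c = ⟨1, buf ++ [c], ts⟩ := by
  simp [pvStepB, h]

theorem pvStepB_ident_end (c : Char) (buf : List Char) (ts : List String)
    (h : pvIsIdent c = false) :
    pvStepB ⟨1, buf, ts⟩ c = pvNormalB ⟨0, [], ts ++ [String.mk buf]⟩ c := by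
  simp [pvStepB, h]

theorem pvStepB_normal (c : Char) (buf : List Char) (ts : List String) :
    pvStepB ⟨0, buf, ts⟩ c = pvNormalB ⟨0, buf, ts⟩ c := by
  simp [pvStepB]

-- running B's DFA from the string state consumes exactly A's string scan
theorem pvFoldB_str : ∀ (cs buf : List Char) (ts : List String),
    pvFinishB (cs.foldl pvStepB ⟨2, buf, ts⟩)
      = pvFinishB ((pvScanStrA cs).2.foldl pvStepB
          ⟨0, [], ts ++ [String.mk (buf ++ (pvScanStrA cs).1)]⟩) := by
  intro cs
  induction cs using pvScanStrA.induct with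
  | case1 => intro buf ts; simp [pvScanStrA, pvFinishB]
  | case2 rest =>
      intro buf ts
      rw [pvScanStrA_quote]
      simp [List.foldl_cons, pvStepB_str_quote]
  | case3 =>
      intro buf ts
      rw [pvScanStrA_lone]
      simp [List.foldl_cons, pvStepB_str_esc, pvFinishB]
  | case4 d rest h ih =>
      intro buf ts
      rw [pvScanStrA_esc]
      rw [List.foldl_cons, pvStepB_str_esc, List.foldl_cons, pvStepB_escState,
        List.append_assoc]
      rw [ih (buf ++ (['\\'] ++ [d])) ts]
      simp
  | case5 c rest h1 h2 ih =>
      intro buf ts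
      rw [pvScanStrA_other c rest h1 h2]
      rw [List.foldl_cons, pvStepB_str_other c buf ts h1 h2]
      rw [ih (buf ++ [c]) ts]
      simp

-- running B's DFA from the comment state equals restarting in the normal state
-- after A's comment drop (the kept '\n' is whitespace in the normal state)
theorem pvFoldB_comment : ∀ (cs buf : List Char) (ts : List String),
    pvFinishB (cs.foldl pvStepB ⟨4, buf, ts⟩)
      = pvFinishB ((pvDropCommentA cs).foldl pvStepB ⟨0, buf, ts⟩) := by
  intro cs
  induction cs with
  | nil => intro buf ts; simp [pvDropCommentA, pvFinishB]
  | cons c rest ih =>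
      intro buf ts
      by_cases h : c = '\n'
      · subst h
        have hd : pvDropCommentA ('\n' :: rest) = '\n' :: rest := by simp [pvDropCommentA]
        rw [hd, List.foldl_cons, pvStepB_comment_nl, List.foldl_cons, pvStepB_normal,
          show pvNormalB ⟨0, buf, ts⟩ '\n' = ⟨0, buf, ts⟩ by
            simp [pvNormalB, pvIsStruct, pvIsWs]]
      · simp only [pvDropCommentA, if_neg h, List.foldl_cons, pvStepB_comment_other c buf ts h]
        exact ih buf ts

-- running B's DFA from the identifier state consumes exactly A's identifier scan
theorem pvFoldB_ident : ∀ (cs buf : List Char) (ts : List String),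
    pvFinishB (cs.foldl pvStepB ⟨1, buf, ts⟩)
      = pvFinishB ((pvScanIdentA cs).2.foldl pvStepB
          ⟨0, [], ts ++ [String.mk (buf ++ (pvScanIdentA cs).1)]⟩) := by
  intro cs
  induction cs with
  | nil => intro buf ts; simp [pvScanIdentA, pvFinishB]
  | cons c rest ih =>
      intro buf ts
      by_cases h : pvIsIdent c = true
      · simp only [pvScanIdentA, h, if_pos, List.foldl_cons, pvStepB_ident_cont c buf ts h]
        rw [ih (buf ++ [c]) ts]
        simp
      · have h' : pvIsIdent c = false := by simpa using h
        simp only [pvScanIdentA, h', Bool.false_eq_true, if_false, List.foldl_cons,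
          pvStepB_ident_end c buf ts h', pvStepB_normal]
        simp

-- main invariant: from the normal state, B's fold+flush produces A's token list
theorem pvFoldB_main : ∀ (n : Nat) (cs buf : List Char) (ts : List String), cs.length ≤ n →
    pvFinishB (cs.foldl pvStepB ⟨0, buf, ts⟩) = ts ++ pvTokA cs := by
  intro n
  induction n with
  | zero =>
      intro cs buf ts h
      have : cs = [] := by cases cs <;> simp_all
      subst this; simp [pvTokA, pvFinishB]
  | succ n ih =>
      intro cs buf ts hlen
      cases cs with
      | nil => simp [pvTokA, pvFinishB]
      | cons c rest =>
        simp only [List.length_cons] at hlen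
        rw [List.foldl_cons, pvStepB_normal]
        by_cases hws : pvIsWs c = true
        · have h1 : c ≠ '"' := by rintro rfl; simp [pvIsWs] at hws
          have h2 : pvIsStruct c = false := by
            simp only [pvIsWs, Bool.or_eq_true, decide_eq_true_eq] at hws
            rcases hws with ((rfl | rfl) | rfl) | rfl <;> decide
          have h3 : c ≠ '#' := by rintro rfl; simp [pvIsWs] at hws
          rw [show pvTokA (c :: rest) = pvTokA rest by simp [pvTokA, hws]]
          rw [show pvNormalB ⟨0, buf, ts⟩ c = ⟨0, buf, ts⟩ by
            simp [pvNormalB, h1, h2, h3, hws]]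
          exact ih rest buf ts (by omega)
        · by_cases hc : c = '#'
          · subst hc
            rw [show pvTokA ('#' :: rest) = pvTokA (pvDropCommentA rest) by
                  simp [pvTokA, pvIsWs]]
            rw [show pvNormalB ⟨0, buf, ts⟩ '#' = ⟨4, buf, ts⟩ by
              simp [pvNormalB, pvIsStruct]]
            rw [pvFoldB_comment rest buf ts]
            exact ih _ buf ts (le_trans (pvDropCommentA_len rest) (by omega))
          · by_cases hst : pvIsStruct c = true
            · have h1 : c ≠ '"' := by
                simp only [pvIsStruct, Bool.or_eq_true, decide_eq_true_eq] at hst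
                rcases hst with (rfl | rfl) | rfl <;> decide
              rw [show pvTokA (c :: rest) = String.mk [c] :: pvTokA rest by
                    simp [pvTokA, hws, hc, hst]]
              rw [show pvNormalB ⟨0, buf, ts⟩ c = ⟨0, buf, ts ++ [String.mk [c]]⟩ by
                simp [pvNormalB, h1, hst]]
              rw [ih rest buf (ts ++ [String.mk [c]]) (by omega)]
              simp
            · by_cases hq : c = '"'
              · subst hq
                rw [show pvTokA ('"' :: rest)
                      = String.mk ('"' :: (pvScanStrA rest).1) :: pvTokA (pvScanStrA rest).2 by
                      simp [pvTokA, pvIsWs, pvIsStruct]]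
                rw [show pvNormalB ⟨0, buf, ts⟩ '"' = ⟨2, ['"'], ts⟩ by simp [pvNormalB]]
                rw [pvFoldB_str rest ['"'] ts]
                simp only [List.singleton_append]
                rw [ih _ [] (ts ++ [String.mk ('"' :: (pvScanStrA rest).1)])
                      (le_trans (pvScanStrA_len rest) (by omega))]
                simp
              · rw [show pvTokA (c :: rest)
                      = String.mk (c :: (pvScanIdentA rest).1) :: pvTokA (pvScanIdentA rest).2 by
                      simp [pvTokA, hws, hc, hst, hq]]
                rw [show pvNormalB ⟨0, buf, ts⟩ c = ⟨1, [c], ts⟩ by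
                  simp [pvNormalB, hq, hst, hc, hws]]
                rw [pvFoldB_ident rest [c] ts]
                simp only [List.singleton_append]
                rw [ih _ [] (ts ++ [String.mk (c :: (pvScanIdentA rest).1)])
                      (le_trans (pvScanIdentA_len rest) (by omega))]
                simp

-- ===== VERDICT (by name: the statement is the Claim_ definition above) =====
theorem parse_pdx_to_tokens_spec : Claim_equal_parse_pdx_to_tokens := by
  intro text _
  unfold Spec_parse_pdx_to_tokens parse_pdx_to_tokens parse_pdx_to_tokens_alt
  exact (pvFoldB_main text.toList.length text.toList [] [] le_rfl).symm
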